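-- pv_equiv track=rewrite | github.com/geodimitrov/Softuniada | 2019/02. crocs.py | add_bottom_to_body
-- ===== SOURCE A (Python) =====
-- def add_bottom_to_body(n, width):
--     result = ""
--
--     for i in range(n + 2):
--         if i % 2 == 0:
--             line = width * "#" + "\n"
--         else:
--             line = n * "#" + " " + (width - (n * 2)) // 2 * "# " + n * "#" + "\n"
--
--         result += line
--
--     return result
-- ===== SOURCE B (Python) =====
-- def add_bottom_to_body(n, width):
--     m = n + 2
--     if m <= 0:
--         return ''
--     even = '#' * width + '\n'
--     odd = '#' * n + ' #' * ((width - 2 * n) // 2) + ' ' + '#' * n + '\n'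
--     lines = [even, odd] * (m // 2)
--     if m % 2 == 1:
--         lines.append(even)
--     return ''.join(lines)
-- ===== Notes on version B (the rewrite author's own statement) =====
-- stated objective: simpler
-- what changed: B precomputes the two line strings, builds the list of lines by list multiplication of the [even, odd] pair plus one trailing even line for odd counts, joins them, and returns early when there are no lines, instead of looping over every line index and branching on i % 2; the odd line is also assembled as '#'*n + ' #'*k + ' ' + '#'*n instead of '#'*n + ' ' + '# '*k + '#'*n.
import Mathlib
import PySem

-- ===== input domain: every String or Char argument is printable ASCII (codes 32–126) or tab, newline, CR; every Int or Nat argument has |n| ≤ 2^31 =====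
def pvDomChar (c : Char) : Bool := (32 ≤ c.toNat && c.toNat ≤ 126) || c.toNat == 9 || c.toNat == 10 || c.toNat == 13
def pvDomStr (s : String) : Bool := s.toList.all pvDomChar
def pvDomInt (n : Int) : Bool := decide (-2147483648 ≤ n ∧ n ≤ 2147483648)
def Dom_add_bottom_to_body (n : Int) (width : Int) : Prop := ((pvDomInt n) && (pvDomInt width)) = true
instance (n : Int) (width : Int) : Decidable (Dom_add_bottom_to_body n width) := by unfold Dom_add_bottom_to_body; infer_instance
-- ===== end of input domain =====

-- B builds the list of lines by multiplying the [even, odd] pair and joining, with the odd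
-- line assembled in a different grouping, instead of a per-index parity branch; objective: simpler.

-- ===== PORT A =====
def add_bottom_to_body (n : Int) (width : Int) : String :=
  String.ofList ((PySem.List.pyRange 0 (n + 2) 1).foldl
    (fun acc i => acc ++
      (if PySem.Int.mod i 2 = 0 then
        -- width * "#" + "\n"
        PySem.List.pyRepeat ['#'] width ++ ['\n']
      else
        -- n * "#" + " " + (width - (n * 2)) // 2 * "# " + n * "#" + "\n"
        PySem.List.pyRepeat ['#'] n ++ [' '] ++
          PySem.List.pyRepeat ['#', ' '] (PySem.Int.floordiv (width - n * 2) 2) ++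
          PySem.List.pyRepeat ['#'] n ++ ['\n']))
    [])

-- ===== PORT B =====
def add_bottom_to_body_alt (n : Int) (width : Int) : String :=
  let m : Int := n + 2
  if m ≤ 0 then ""
  else
    -- even = '#' * width + '\n'
    let even : List Char := PySem.List.pyRepeat ['#'] width ++ ['\n']
    -- odd = '#' * n + ' #' * ((width - 2 * n) // 2) + ' ' + '#' * n + '\n'
    let odd : List Char :=
      PySem.List.pyRepeat ['#'] n ++
        PySem.List.pyRepeat [' ', '#'] (PySem.Int.floordiv (width - 2 * n) 2) ++
        [' '] ++ PySem.List.pyRepeat ['#'] n ++ ['\n']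
    -- lines = [even, odd] * (m // 2); if m % 2 == 1: lines.append(even)
    let lines : List (List Char) := PySem.List.pyRepeat [even, odd] (PySem.Int.floordiv m 2)
    let lines : List (List Char) :=
      if PySem.Int.mod m 2 = 1 then lines ++ [even] else lines
    -- return ''.join(lines)
    String.ofList lines.flatten

-- ===== PRECONDITION & SPEC =====
def Spec_add_bottom_to_body (n : Int) (width : Int) (out : String) : Prop := out = add_bottom_to_body_alt n width
instance (n : Int) (width : Int) (out : String) : Decidable (Spec_add_bottom_to_body n width out) := by unfold Spec_add_bottom_to_body; infer_instance

-- ===== CLAIM (what is proved, stated in full; the proofs are below) =====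
def Claim_equal_add_bottom_to_body : Prop := ∀ (n : Int) (width : Int), Dom_add_bottom_to_body n width → Spec_add_bottom_to_body n width (add_bottom_to_body n width)

-- ===== LEMMAS AND PROOFS =====

theorem pv_mod_cast (k : Nat) : PySem.Int.mod (k : Int) 2 = ((k % 2 : Nat) : Int) := by
  simp only [PySem.Int.mod, Int.fmod_eq_emod]
  omega

-- A's odd line equals B's odd line: ' ' + ('# ')*k + t = (' #')*k + ' ' + t
theorem pv_space_shift (k : Nat) (t : List Char) :
    ' ' :: ((List.replicate k (['#', ' '] : List Char)).flatten ++ t)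
      = (List.replicate k ([' ', '#'] : List Char)).flatten ++ ' ' :: t := by
  induction k with
  | zero => simp
  | succ k ih => simp [List.replicate_succ, ih]

-- the parity-branching loop of A, run over 0..m-1, equals m/2 pairs plus a remainder even line
theorem pv_loop_eq (E O : List Char) (m : Nat) :
    (List.range m).foldl
      (fun acc (k : Nat) => acc ++ (if PySem.Int.mod (k : Int) 2 = 0 then E else O)) []
    = (List.replicate (m / 2) (E ++ O)).flatten ++ (if m % 2 = 1 then E else []) := by
  induction m with
  | zero => simp
  | succ m ih =>
    rw [List.range_succ, List.foldl_append, ih]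
    simp only [List.foldl_cons, List.foldl_nil]
    rw [pv_mod_cast]
    rcases Nat.even_or_odd m with hm | hm
    · obtain ⟨k, hk⟩ := hm
      have h1 : m % 2 = 0 := by omega
      have h2 : (m + 1) % 2 = 1 := by omega
      have h3 : (m + 1) / 2 = m / 2 := by omega
      simp [h1, h2, h3]
    · obtain ⟨k, hk⟩ := hm
      have h1 : m % 2 = 1 := by omega
      have h2 : (m + 1) % 2 = 0 := by omega
      have h3 : (m + 1) / 2 = m / 2 + 1 := by omega
      rw [h1, h2, h3, List.replicate_succ']
      simp

-- joining q copies of the pair of lines [E, O] is q copies of E ++ O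
theorem pv_pair_flatten (E O : List Char) (q : Nat) :
    ((List.replicate q ([E, O] : List (List Char))).flatten).flatten
      = (List.replicate q (E ++ O)).flatten := by
  induction q with
  | zero => simp
  | succ q ih => simp [List.replicate_succ, ih]

theorem add_bottom_to_body_eq (n width : Int) :
    add_bottom_to_body n width = add_bottom_to_body_alt n width := by
  unfold add_bottom_to_body add_bottom_to_body_alt
  simp only []
  set E : List Char := PySem.List.pyRepeat ['#'] width ++ ['\n'] with hE
  set OA : List Char := PySem.List.pyRepeat ['#'] n ++ [' '] ++
      PySem.List.pyRepeat ['#', ' '] (PySem.Int.floordiv (width - n * 2) 2) ++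
      PySem.List.pyRepeat ['#'] n ++ ['\n'] with hOA
  set OB : List Char := PySem.List.pyRepeat ['#'] n ++
      PySem.List.pyRepeat [' ', '#'] (PySem.Int.floordiv (width - 2 * n) 2) ++
      [' '] ++ PySem.List.pyRepeat ['#'] n ++ ['\n'] with hOB
  have hO : OA = OB := by
    rw [hOA, hOB]
    have h2 : width - n * 2 = width - 2 * n := by ring
    rw [h2]
    simp only [PySem.List.pyRepeat, List.append_assoc, List.nil_append,
      List.cons_append]
    rw [pv_space_shift]
  by_cases hneg : n + 2 ≤ 0
  · have h1 : PySem.List.pyRange 0 (n + 2) 1 = [] := PySem.List.pyRange_one_eq_nil (by omega)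
    rw [h1, if_pos hneg]
    simp
  · have hpos : 0 < n + 2 := by omega
    rw [if_neg hneg, PySem.List.pyRange_one, List.foldl_map]
    simp only [Int.sub_zero, zero_add]
    rw [pv_loop_eq E OA ((n + 2).toNat)]
    set m : Nat := (n + 2).toNat with hmm
    have hdiv : PySem.Int.floordiv (n + 2) 2 = ((m / 2 : Nat) : Int) := by
      simp only [PySem.Int.floordiv, Int.fdiv_eq_ediv]
      omega
    have hmod : PySem.Int.mod (n + 2) 2 = ((m % 2 : Nat) : Int) := by
      simp only [PySem.Int.mod, Int.fmod_eq_emod]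
      omega
    rw [hdiv, hmod, hO]
    simp only [PySem.List.pyRepeat, Int.toNat_natCast]
    rcases Nat.even_or_odd m with hm2 | hm2
    · obtain ⟨k, hk⟩ := hm2
      have h1 : m % 2 = 0 := by omega
      have hc : ¬ (((m % 2 : Nat) : Int) = 1) := by
        rw [h1]
        simp
      rw [if_neg hc, if_neg (by omega : ¬ m % 2 = 1), pv_pair_flatten]
      simp
    · obtain ⟨k, hk⟩ := hm2
      have h1 : m % 2 = 1 := by omega
      have hc : ((m % 2 : Nat) : Int) = 1 := by rw [h1]; rfl
      rw [if_pos hc, if_pos h1, List.flatten_append, pv_pair_flatten]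
      simp

-- ===== VERDICT (by name: the statement is the Claim_ definition above) =====
theorem add_bottom_to_body_spec : Claim_equal_add_bottom_to_body := by
  intro n width _
  exact add_bottom_to_body_eq n width
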